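import Mathlib.Order.Defs.LinearOrder
import PySemCore

/-!
# PySem — the import surface: PySemCore (every Python-exact primitive and bridge lemma; core-Lean only, kernel-transparent)
# plus the order-theoretic SPEC lemmas of sorted / min? / max?, which need Mathlib's LinearOrder and so live here

PySemCore is core-only (so it compiles in seconds and stays kernel-transparent); the facts a port's PROOF usually needs about
sorting and extrema are stated here under Mathlib's `LinearOrder` on the key type: the output of `sorted` is ordered by key
(and a permutation — `PySem.List.sorted_perm`), and `max?`/`min?` return an element whose key bounds every element's key.
Cite these by name; do not re-prove them.
-/

namespace PySem.List

variable {α κ : Type} [LinearOrder κ]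

theorem insertBy_pairwise_le (key : α → κ) (x : α) (ys : _root_.List α)
    (h : ys.Pairwise (fun a b => key a ≤ key b)) :
    (insertBy (fun a b => decide (key a < key b)) x ys).Pairwise (fun a b => key a ≤ key b) := by
  induction ys with
  | nil => simp [insertBy]
  | cons y ys ih =>
    rw [_root_.List.pairwise_cons] at h
    obtain ⟨hy, hys⟩ := h
    simp only [insertBy]
    split
    · rename_i hlt
      have hxy : key x < key y := by simpa using hlt
      refine _root_.List.pairwise_cons.mpr ⟨?_, _root_.List.pairwise_cons.mpr ⟨hy, hys⟩⟩
      intro z hz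
      rcases _root_.List.mem_cons.mp hz with rfl | hz
      · exact le_of_lt hxy
      · exact le_trans (le_of_lt hxy) (hy z hz)
    · rename_i hnlt
      have hyx : key y ≤ key x := by simpa using hnlt
      refine _root_.List.pairwise_cons.mpr ⟨?_, ih hys⟩
      intro z hz
      rcases (insertBy_mem_iff _ x z ys).mp hz with rfl | hz
      · exact hyx
      · exact hy z hz

theorem insertBy_pairwise_ge (key : α → κ) (x : α) (ys : _root_.List α)
    (h : ys.Pairwise (fun a b => key b ≤ key a)) :
    (insertBy (fun a b => decide (key b < key a)) x ys).Pairwise (fun a b => key b ≤ key a) := by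
  induction ys with
  | nil => simp [insertBy]
  | cons y ys ih =>
    rw [_root_.List.pairwise_cons] at h
    obtain ⟨hy, hys⟩ := h
    simp only [insertBy]
    split
    · rename_i hlt
      have hxy : key y < key x := by simpa using hlt
      refine _root_.List.pairwise_cons.mpr ⟨?_, _root_.List.pairwise_cons.mpr ⟨hy, hys⟩⟩
      intro z hz
      rcases _root_.List.mem_cons.mp hz with rfl | hz
      · exact le_of_lt hxy
      · exact le_trans (hy z hz) (le_of_lt hxy)
    · rename_i hnlt
      have hyx : key x ≤ key y := by simpa using hnlt
      refine _root_.List.pairwise_cons.mpr ⟨?_, ih hys⟩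
      intro z hz
      rcases (insertBy_mem_iff _ x z ys).mp hz with rfl | hz
      · exact hyx
      · exact hy z hz

/-- `sorted(xs, key=key)` is ordered by key (ascending): every earlier element's key ≤ every later one's. -/
theorem sorted_pairwise (xs : _root_.List α) (key : α → κ) :
    (sorted xs key false).Pairwise (fun a b => key a ≤ key b) := by
  unfold sorted
  simp only [Bool.false_eq_true, ↓reduceIte]
  suffices H : ∀ (acc : _root_.List α), acc.Pairwise (fun a b => key a ≤ key b) →
      (xs.foldl (fun acc x => insertBy (fun a b => decide (key a < key b)) x acc) acc).Pairwise (fun a b => key a ≤ key b) from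
    H [] _root_.List.Pairwise.nil
  induction xs with
  | nil => intro acc h; simpa
  | cons x xs ih => intro acc h; simp only [_root_.List.foldl_cons]; exact ih _ (insertBy_pairwise_le key x acc h)

/-- `sorted(xs, key=key, reverse=True)` is ordered by key descending. -/
theorem sorted_pairwise_rev (xs : _root_.List α) (key : α → κ) :
    (sorted xs key true).Pairwise (fun a b => key b ≤ key a) := by
  unfold sorted
  simp only [↓reduceIte]
  suffices H : ∀ (acc : _root_.List α), acc.Pairwise (fun a b => key b ≤ key a) →
      (xs.foldl (fun acc x => insertBy (fun a b => decide (key b < key a)) x acc) acc).Pairwise (fun a b => key b ≤ key a) from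
    H [] _root_.List.Pairwise.nil
  induction xs with
  | nil => intro acc h; simpa
  | cons x xs ih => intro acc h; simp only [_root_.List.foldl_cons]; exact ih _ (insertBy_pairwise_ge key x acc h)

/-- The same fact on the key list: `((sorted xs key).map key).Pairwise (· ≤ ·)` (Mathlib's `Sorted` is this Pairwise). -/
theorem sorted_map_key_pairwise (xs : _root_.List α) (key : α → κ) : ((sorted xs key false).map key).Pairwise (· ≤ ·) := by
  rw [_root_.List.pairwise_map]; exact sorted_pairwise xs key

/-- `max(xs, key=key)`'s result bounds every element's key from above. -/
theorem max?_isMax {xs : _root_.List α} {key : α → κ} {m : α} (h : max? xs key = some m) : ∀ y ∈ xs, key y ≤ key m := by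
  unfold max? at h
  suffices H : ∀ (l : _root_.List α) (acc : Option α) (r : α),
      l.foldl (fun acc x => match acc with | none => some x | some m => if key m < key x then some x else some m) acc = some r →
      (∀ y ∈ l, key y ≤ key r) ∧ (∀ a, acc = some a → key a ≤ key r) from (H xs none m (by simpa using h)).1
  intro l
  induction l with
  | nil => intro acc r h; simp at h; subst h; simp
  | cons y ys ih =>
    intro acc r h
    simp only [_root_.List.foldl_cons] at h
    have ⟨h1, h2⟩ := ih _ r h
    cases acc with
    | none =>
      refine ⟨fun z hz => ?_, by simp⟩
      rcases _root_.List.mem_cons.mp hz with rfl | hz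
      · exact h2 _ rfl
      · exact h1 z hz
    | some a =>
      by_cases hlt : key a < key y
      · have hy : key y ≤ key r := h2 y (by simp [hlt])
        refine ⟨fun z hz => ?_, fun a' ha' => ?_⟩
        · rcases _root_.List.mem_cons.mp hz with rfl | hz
          · exact hy
          · exact h1 z hz
        · cases ha'; exact le_trans (le_of_lt hlt) hy
      · have ha : key a ≤ key r := h2 a (by simp [hlt])
        refine ⟨fun z hz => ?_, fun a' ha' => ?_⟩
        · rcases _root_.List.mem_cons.mp hz with rfl | hz
          · exact le_trans (not_lt.mp hlt) ha
          · exact h1 z hz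
        · cases ha'; exact ha

/-- `min(xs, key=key)`'s result bounds every element's key from below. -/
theorem min?_isMin {xs : _root_.List α} {key : α → κ} {m : α} (h : min? xs key = some m) : ∀ y ∈ xs, key m ≤ key y := by
  unfold min? at h
  suffices H : ∀ (l : _root_.List α) (acc : Option α) (r : α),
      l.foldl (fun acc x => match acc with | none => some x | some m => if key x < key m then some x else some m) acc = some r →
      (∀ y ∈ l, key r ≤ key y) ∧ (∀ a, acc = some a → key r ≤ key a) from (H xs none m (by simpa using h)).1
  intro l
  induction l with
  | nil => intro acc r h; simp at h; subst h; simp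
  | cons y ys ih =>
    intro acc r h
    simp only [_root_.List.foldl_cons] at h
    have ⟨h1, h2⟩ := ih _ r h
    cases acc with
    | none =>
      refine ⟨fun z hz => ?_, by simp⟩
      rcases _root_.List.mem_cons.mp hz with rfl | hz
      · exact h2 _ rfl
      · exact h1 z hz
    | some a =>
      by_cases hlt : key y < key a
      · have hy : key r ≤ key y := h2 y (by simp [hlt])
        refine ⟨fun z hz => ?_, fun a' ha' => ?_⟩
        · rcases _root_.List.mem_cons.mp hz with rfl | hz
          · exact hy
          · exact h1 z hz
        · cases ha'; exact le_trans hy (le_of_lt hlt)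
      · have ha : key r ≤ key a := h2 a (by simp [hlt])
        refine ⟨fun z hz => ?_, fun a' ha' => ?_⟩
        · rcases _root_.List.mem_cons.mp hz with rfl | hz
          · exact le_trans ha (not_lt.mp hlt)
          · exact h1 z hz
        · cases ha'; exact ha

/-- max with the identity key on a linear order: the classic statements. -/
theorem max?_id_le {xs : _root_.List κ} {m : κ} (h : max? xs (fun x => x) = some m) : ∀ y ∈ xs, y ≤ m := max?_isMax h
theorem min?_id_le {xs : _root_.List κ} {m : κ} (h : min? xs (fun x => x) = some m) : ∀ y ∈ xs, m ≤ y := min?_isMin h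


/-! ### Lemma pack 3 — sorted of an already-ordered list, uniqueness of the sorted order, idempotence -/

/-- a list already ordered by key is its own 'sorted' (Python's sort is stable, so ties stay put too). -/
theorem sorted_eq_self_of_pairwise (xs : _root_.List α) (key : α → κ) (h : xs.Pairwise (fun a b => key a ≤ key b)) :
    sorted xs key false = xs := by
  rw [sorted_eq_foldl_insertBy]
  suffices H : ∀ (acc rest : _root_.List α), (acc ++ rest).Pairwise (fun a b => key a ≤ key b) →
      rest.foldl (fun acc x => insertBy (fun a b => decide (key a < key b)) x acc) acc = acc ++ rest by simpa using H [] xs (by simpa using h)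
  intro acc rest
  induction rest generalizing acc with
  | nil => intro _; simp
  | cons x t ih =>
    intro hp
    simp only [_root_.List.foldl_cons]
    rw [insertBy_of_forall_not_before]
    · rw [ih (acc ++ [x]) (by simpa using hp)]; simp
    · intro y hy
      have : key y ≤ key x := (_root_.List.pairwise_append.mp hp).2.2 y hy x _root_.List.mem_cons_self
      simpa using not_lt.mpr this
theorem sorted_rev_eq_self_of_pairwise (xs : _root_.List α) (key : α → κ) (h : xs.Pairwise (fun a b => key b ≤ key a)) :
    sorted xs key true = xs := by
  rw [sorted_rev_eq_foldl_insertBy]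
  suffices H : ∀ (acc rest : _root_.List α), (acc ++ rest).Pairwise (fun a b => key b ≤ key a) →
      rest.foldl (fun acc x => insertBy (fun a b => decide (key b < key a)) x acc) acc = acc ++ rest by simpa using H [] xs (by simpa using h)
  intro acc rest
  induction rest generalizing acc with
  | nil => intro _; simp
  | cons x t ih =>
    intro hp
    simp only [_root_.List.foldl_cons]
    rw [insertBy_of_forall_not_before]
    · rw [ih (acc ++ [x]) (by simpa using hp)]; simp
    · intro y hy
      have : key x ≤ key y := (_root_.List.pairwise_append.mp hp).2.2 y hy x _root_.List.mem_cons_self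
      simpa using not_lt.mpr this
/-- sorting twice is sorting once. -/
@[simp] theorem sorted_sorted (xs : _root_.List α) (key : α → κ) : sorted (sorted xs key false) key false = sorted xs key false :=
  sorted_eq_self_of_pairwise _ key (sorted_pairwise xs key)
@[simp] theorem sorted_rev_sorted_rev (xs : _root_.List α) (key : α → κ) : sorted (sorted xs key true) key true = sorted xs key true :=
  sorted_rev_eq_self_of_pairwise _ key (sorted_pairwise_rev xs key)
/-- 'sorted' of equal-as-multiset inputs with pairwise-DISTINCT keys agree; in particular any strictly key-increasing
rearrangement of xs IS sorted(xs, key=key) (the usual way to name the sorted order explicitly). -/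
theorem eq_of_perm_of_pairwise_le_of_pairwise_lt {l₁ l₂ : _root_.List α} (key : α → κ) (hp : l₁.Perm l₂)
    (h₁ : l₁.Pairwise (fun a b => key a ≤ key b)) (h₂ : l₂.Pairwise (fun a b => key a < key b)) : l₁ = l₂ := by
  induction l₂ generalizing l₁ with
  | nil => exact hp.eq_nil
  | cons b t ih =>
    cases l₁ with
    | nil => exact absurd hp.symm.eq_nil (by simp)
    | cons a s =>
      rw [_root_.List.pairwise_cons] at h₁ h₂
      have hab : a = b := by
        by_contra hne
        have ha : a ∈ t := by simpa [hne] using hp.subset (_root_.List.mem_cons_self)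
        have hb : b ∈ s := by simpa [Ne.symm hne] using hp.symm.subset (_root_.List.mem_cons_self)
        exact absurd (lt_of_lt_of_le (h₂.1 a ha) (h₁.1 b hb)) (lt_irrefl _)
      subst hab
      rw [ih (_root_.List.Perm.cons_inv hp) h₁.2 h₂.2]
theorem sorted_eq_of_perm_of_pairwise_lt (xs ys : _root_.List α) (key : α → κ) (hp : ys.Perm xs) (hs : ys.Pairwise (fun a b => key a < key b)) :
    sorted xs key false = ys :=
  eq_of_perm_of_pairwise_le_of_pairwise_lt key ((sorted_perm xs key false).trans hp.symm) (sorted_pairwise xs key) hs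
theorem eq_of_perm_of_pairwise_ge_of_pairwise_gt {l₁ l₂ : _root_.List α} (key : α → κ) (hp : l₁.Perm l₂)
    (h₁ : l₁.Pairwise (fun a b => key b ≤ key a)) (h₂ : l₂.Pairwise (fun a b => key b < key a)) : l₁ = l₂ := by
  induction l₂ generalizing l₁ with
  | nil => exact hp.eq_nil
  | cons b t ih =>
    cases l₁ with
    | nil => exact absurd hp.symm.eq_nil (by simp)
    | cons a s =>
      rw [_root_.List.pairwise_cons] at h₁ h₂
      have hab : a = b := by
        by_contra hne
        have ha : a ∈ t := by simpa [hne] using hp.subset (_root_.List.mem_cons_self)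
        have hb : b ∈ s := by simpa [Ne.symm hne] using hp.symm.subset (_root_.List.mem_cons_self)
        exact absurd (lt_of_lt_of_le (h₂.1 a ha) (h₁.1 b hb)) (lt_irrefl _)
      subst hab
      rw [ih (_root_.List.Perm.cons_inv hp) h₁.2 h₂.2]
theorem sorted_rev_eq_of_perm_of_pairwise_gt (xs ys : _root_.List α) (key : α → κ) (hp : ys.Perm xs) (hs : ys.Pairwise (fun a b => key b < key a)) :
    sorted xs key true = ys :=
  eq_of_perm_of_pairwise_ge_of_pairwise_gt key ((sorted_perm xs key true).trans hp.symm) (sorted_pairwise_rev xs key) hs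
/-- sorted on the identity key is unique among ≤-ordered rearrangements (no tie question): the classic characterisation. -/
theorem eq_of_perm_of_pairwise_le {l₁ l₂ : _root_.List κ} (hp : l₁.Perm l₂) (h₁ : l₁.Pairwise (· ≤ ·)) (h₂ : l₂.Pairwise (· ≤ ·)) : l₁ = l₂ := by
  induction l₂ generalizing l₁ with
  | nil => exact hp.eq_nil
  | cons b t ih =>
    cases l₁ with
    | nil => exact absurd hp.symm.eq_nil (by simp)
    | cons a s =>
      rw [_root_.List.pairwise_cons] at h₁ h₂
      have hab : a = b := by
        by_contra hne
        have ha : a ∈ t := by simpa [hne] using hp.subset (_root_.List.mem_cons_self)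
        have hb : b ∈ s := by simpa [Ne.symm hne] using hp.symm.subset (_root_.List.mem_cons_self)
        exact hne (le_antisymm (h₁.1 b hb) (h₂.1 a ha))
      subst hab
      rw [ih (_root_.List.Perm.cons_inv hp) h₁.2 h₂.2]
theorem sorted_id_eq_of_perm_of_pairwise (xs ys : _root_.List κ) (hp : ys.Perm xs) (hs : ys.Pairwise (· ≤ ·)) : sorted xs (fun x => x) false = ys :=
  eq_of_perm_of_pairwise_le ((sorted_perm xs _ false).trans hp.symm) (sorted_pairwise xs (fun x => x)) hs
/-- the head of sorted(xs) has the least key; the head of sorted(xs, reverse=True) the greatest. -/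
theorem key_head_sorted_le (xs : _root_.List α) (key : α → κ) {m : α} {t : _root_.List α} (h : sorted xs key false = m :: t) : ∀ y ∈ xs, key m ≤ key y := by
  intro y hy
  have hy' : y ∈ sorted xs key false := (mem_sorted xs key false y).mpr hy
  rw [h] at hy'
  rcases _root_.List.mem_cons.mp hy' with rfl | hy'
  · exact le_refl _
  · have := sorted_pairwise xs key; rw [h, _root_.List.pairwise_cons] at this; exact this.1 y hy'
theorem key_head_sorted_rev_ge (xs : _root_.List α) (key : α → κ) {m : α} {t : _root_.List α} (h : sorted xs key true = m :: t) : ∀ y ∈ xs, key y ≤ key m := by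
  intro y hy
  have hy' : y ∈ sorted xs key true := (mem_sorted xs key true y).mpr hy
  rw [h] at hy'
  rcases _root_.List.mem_cons.mp hy' with rfl | hy'
  · exact le_refl _
  · have := sorted_pairwise_rev xs key; rw [h, _root_.List.pairwise_cons] at this; exact this.1 y hy'
/-- the sorted distinct elements: sorted(set(xs)) is STRICTLY increasing. -/
theorem sorted_ofList_pairwise_lt [BEq κ] [LawfulBEq κ] (xs : _root_.List κ) : (sorted (Set.ofList xs) (fun x => x) false).Pairwise (· < ·) := by
  have h1 := sorted_pairwise (Set.ofList xs) (fun x => x)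
  have h2 : (sorted (Set.ofList xs) (fun x => x) false).Pairwise (fun a b => a ≠ b) := (sorted_perm _ _ false).nodup_iff.mpr (Set.nodup_ofList xs)
  exact (h1.and h2).imp (fun ⟨hle, hne⟩ => lt_of_le_of_ne hle hne)


/-! ### Lemma pack 4 — max/min without a key as a running fold, sorted under an injective key, positional monotonicity of sorted -/

/-- max(xs) / min(xs) WITHOUT a key on a non-empty list is the running max / min (the loop a port writes). -/
theorem max?_id_cons (x : κ) (t : _root_.List κ) : max? (x :: t) (fun y => y) = some (t.foldl max x) := by
  unfold max?
  simp only [_root_.List.foldl_cons]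
  suffices H : ∀ (acc : κ), t.foldl (fun acc x => match acc with | none => some x | some m => if m < x then some x else some m) (some acc)
      = some (t.foldl max acc) from H x
  induction t with
  | nil => intro acc; rfl
  | cons y u ih =>
    intro acc; simp only [_root_.List.foldl_cons]
    by_cases h : acc < y
    · simp only [h, ↓reduceIte, ih, max_eq_right_of_lt h]
    · simp only [h, ↓reduceIte, ih, max_eq_left (not_lt.mp h)]
theorem min?_id_cons (x : κ) (t : _root_.List κ) : min? (x :: t) (fun y => y) = some (t.foldl min x) := by
  unfold min?
  simp only [_root_.List.foldl_cons]
  suffices H : ∀ (acc : κ), t.foldl (fun acc x => match acc with | none => some x | some m => if x < m then some x else some m) (some acc)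
      = some (t.foldl min acc) from H x
  induction t with
  | nil => intro acc; rfl
  | cons y u ih =>
    intro acc; simp only [_root_.List.foldl_cons]
    by_cases h : y < acc
    · simp only [h, ↓reduceIte, ih, min_eq_right_of_lt h]
    · simp only [h, ↓reduceIte, ih, min_eq_left (not_lt.mp h)]
/-- a running max bounds its start and every term; a running min is bounded by them. -/
theorem le_foldl_max (t : _root_.List κ) (a : κ) : a ≤ t.foldl max a ∧ ∀ y ∈ t, y ≤ t.foldl max a := by
  induction t generalizing a with
  | nil => simp
  | cons y u ih =>
    simp only [_root_.List.foldl_cons, _root_.List.mem_cons]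
    have ⟨h1, h2⟩ := ih (max a y)
    exact ⟨le_trans (le_max_left _ _) h1, fun z hz => hz.elim (fun e => by subst e; exact le_trans (le_max_right _ _) h1) (h2 z)⟩
theorem foldl_min_le (t : _root_.List κ) (a : κ) : t.foldl min a ≤ a ∧ ∀ y ∈ t, t.foldl min a ≤ y := by
  induction t generalizing a with
  | nil => simp
  | cons y u ih =>
    simp only [_root_.List.foldl_cons, _root_.List.mem_cons]
    have ⟨h1, h2⟩ := ih (min a y)
    exact ⟨le_trans h1 (min_le_left _ _), fun z hz => hz.elim (fun e => by subst e; exact le_trans h1 (min_le_right _ _)) (h2 z)⟩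
theorem foldl_max_mem (t : _root_.List κ) (a : κ) : t.foldl max a = a ∨ t.foldl max a ∈ t := by
  induction t generalizing a with
  | nil => simp
  | cons y u ih =>
    simp only [_root_.List.foldl_cons, _root_.List.mem_cons]
    rcases ih (max a y) with h | h
    · rw [h]; by_cases hay : a ≤ y
      · simp [max_eq_right hay]
      · simp [max_eq_left (le_of_not_ge hay)]
    · exact Or.inr (Or.inr h)
theorem foldl_min_mem (t : _root_.List κ) (a : κ) : t.foldl min a = a ∨ t.foldl min a ∈ t := by
  induction t generalizing a with
  | nil => simp
  | cons y u ih =>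
    simp only [_root_.List.foldl_cons, _root_.List.mem_cons]
    rcases ih (min a y) with h | h
    · rw [h]; by_cases hay : a ≤ y
      · simp [min_eq_left hay]
      · simp [min_eq_right (le_of_not_ge hay)]
    · exact Or.inr (Or.inr h)

/-- two ≤-by-key-ordered rearrangements of each other under an INJECTIVE key agree — so sorted(xs, key) = sorted(ys, key) for xs ~ ys. -/
theorem eq_of_perm_of_pairwise_le_of_injective {l₁ l₂ : _root_.List α} (key : α → κ) (hinj : Function.Injective key) (hp : l₁.Perm l₂)
    (h₁ : l₁.Pairwise (fun a b => key a ≤ key b)) (h₂ : l₂.Pairwise (fun a b => key a ≤ key b)) : l₁ = l₂ := by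
  induction l₂ generalizing l₁ with
  | nil => exact hp.eq_nil
  | cons b t ih =>
    cases l₁ with
    | nil => exact absurd hp.symm.eq_nil (by simp)
    | cons a s =>
      rw [_root_.List.pairwise_cons] at h₁ h₂
      have hab : a = b := by
        by_contra hne
        have ha : a ∈ t := by simpa [hne] using hp.subset (_root_.List.mem_cons_self)
        have hb : b ∈ s := by simpa [Ne.symm hne] using hp.symm.subset (_root_.List.mem_cons_self)
        exact hne (hinj (le_antisymm (h₁.1 b hb) (h₂.1 a ha)))
      subst hab
      rw [ih (_root_.List.Perm.cons_inv hp) h₁.2 h₂.2]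
theorem sorted_eq_sorted_of_perm (xs ys : _root_.List α) (key : α → κ) (hinj : Function.Injective key) (hp : xs.Perm ys) :
    sorted xs key false = sorted ys key false :=
  eq_of_perm_of_pairwise_le_of_injective key hinj (((sorted_perm xs key false).trans hp).trans (sorted_perm ys key false).symm)
    (sorted_pairwise xs key) (sorted_pairwise ys key)
/-- sorted(xs) == sorted(ys) (no key) exactly for rearrangements. -/
theorem sorted_id_eq_sorted_id_iff_perm (xs ys : _root_.List κ) : sorted xs (fun x => x) false = sorted ys (fun x => x) false ↔ xs.Perm ys :=
  ⟨fun h => ((sorted_perm xs _ false).symm.trans (h ▸ sorted_perm ys _ false)),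
   fun hp => sorted_eq_sorted_of_perm xs ys (fun x => x) (fun _ _ h => h) hp⟩
/-- sorted(xs, key)[p] ≤ sorted(xs, key)[q] by key for p ≤ q (positional monotonicity). -/
theorem key_sorted_getElem_mono (xs : _root_.List α) (key : α → κ) {p q : Nat} (hpq : p ≤ q) (hq : q < (sorted xs key false).length) :
    key ((sorted xs key false)[p]'(by omega)) ≤ key ((sorted xs key false)[q]) := by
  rcases Nat.lt_or_eq_of_le hpq with h | rfl
  · exact _root_.List.pairwise_iff_getElem.mp (sorted_pairwise xs key) p q (by omega) hq h
  · exact le_refl _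
theorem sorted_id_getElem_mono (xs : _root_.List κ) {p q : Nat} (hpq : p ≤ q) (hq : q < (sorted xs (fun x => x) false).length) :
    (sorted xs (fun x => x) false)[p]'(by omega) ≤ (sorted xs (fun x => x) false)[q] :=
  key_sorted_getElem_mono xs (fun x => x) hpq hq

/-! ### Lemma pack 6 — max / min with a default (maxD / minD): the result bounds every element's key; without a key it is the running max / min -/
/-- max(xs, key=key) (list known non-empty; d is never used) bounds every element's key from above. -/
theorem le_key_maxD (xs : _root_.List α) (key : α → κ) (d : α) (h : xs ≠ []) : ∀ y ∈ xs, key y ≤ key (maxD xs key d) :=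
  max?_isMax (max?_eq_some_maxD xs key d h)
/-- min(xs, key=key) bounds every element's key from below. -/
theorem key_minD_le (xs : _root_.List α) (key : α → κ) (d : α) (h : xs ≠ []) : ∀ y ∈ xs, key (minD xs key d) ≤ key y :=
  min?_isMin (min?_eq_some_minD xs key d h)
/-- max(xs) WITHOUT a key: every element ≤ it (vacuous on [], so no side condition). -/
theorem le_maxD_id (xs : _root_.List κ) (d : κ) : ∀ y ∈ xs, y ≤ maxD xs (fun x => x) d := by
  by_cases h : xs = []
  · subst h; simp
  · exact max?_isMax (max?_eq_some_maxD xs (fun x => x) d h)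
theorem minD_id_le (xs : _root_.List κ) (d : κ) : ∀ y ∈ xs, minD xs (fun x => x) d ≤ y := by
  by_cases h : xs = []
  · subst h; simp
  · exact min?_isMin (min?_eq_some_minD xs (fun x => x) d h)
/-- max(xs) / min(xs) without a key on a cons is the running max / min (the loop a port writes). -/
theorem maxD_id_cons (x : κ) (t : _root_.List κ) (d : κ) : maxD (x :: t) (fun y => y) d = t.foldl max x := by
  simp [maxD, max?_id_cons]
theorem minD_id_cons (x : κ) (t : _root_.List κ) (d : κ) : minD (x :: t) (fun y => y) d = t.foldl min x := by
  simp [minD, min?_id_cons]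


end PySem.List

-- The `pysem` simp set (registered in PySemCore): the lemmas of the prelude, so a port's proof can try the book with
-- `simp only [pysem]` before (re)proving a general List/Int/String fact. GENERATED — do not edit by hand:
--   python moroder/moroder/envs/pv_equiv/data/pysem_names.py PySemCore.lean PySem.lean
-- lists every public theorem of both files EXCEPT that script's DENYLIST of rw-only definitional unfolders (unconditional equations
-- whose left side is a bare primitive application and whose right side is its definition / a foldl / an if: pyRange_one, slice_some_none,
-- Set.update_eq_foldl, sorted_eq_foldl_insertBy, Dict.getD_eq_get?_getD, Dict.contains_eq_isSome_get?, …). simp rewrites arguments first, so inside the set such a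
-- lemma rewrites the primitive away before the lemmas ABOUT it (mem_pyRange_one, mem_update, length_sorted, …) can match. They stay
-- citable by name.
attribute [pysem] PySem.Int.floordiv_eq_ediv_of_pos PySem.Int.mod_eq_emod_of_pos PySem.Int.floordiv?_of_ne_zero
  PySem.Int.mod?_of_ne_zero PySem.Int.floordiv_natCast PySem.Int.mod_natCast PySem.Int.mod_nonneg PySem.Int.mod_lt
  PySem.Int.floordiv_mul_add_mod PySem.Int.mod_neg_bounds PySem.Int.floordiv_two_mid_bounds
  PySem.Int.mod_eq_zero_iff_dvd PySem.Int.emod_eq_zero_iff_dvd PySem.Int.mod?_eq_some_zero_iff_dvd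
  PySem.Int.le_floordiv_iff_mul_le PySem.Int.floordiv_lt_iff_lt_mul PySem.Int.floordiv_eq_iff_of_pos
  PySem.Int.neg_floordiv_neg_eq_iff_of_pos PySem.Int.floordiv_neg_neg PySem.Int.mod_neg_neg PySem.Int.floordiv_nonneg
  PySem.Int.mod_two_eq PySem.Int.floordiv_mul_eq_self_iff_dvd PySem.Int.powMod_nonneg PySem.Int.powMod_lt
  PySem.Int.bitLength_zero PySem.Int.bitCount_zero PySem.Int.bitLength_neg PySem.Int.bitCount_neg
  PySem.Int.bitLength_natCast_zero PySem.Int.bitCount_natCast_zero PySem.Int.bitLength_natCast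
  PySem.Int.bitCount_natCast PySem.Int.bitLength_of_pos PySem.Int.bitCount_of_pos PySem.Int.lt_two_pow_bitLength
  PySem.Int.two_pow_bitLength_le PySem.Int.bitCount_le_bitLength PySem.Int.band_natCast PySem.Int.bor_natCast
  PySem.Int.bxor_natCast PySem.Int.band_of_nonneg PySem.Int.bor_of_nonneg PySem.Int.bxor_of_nonneg
  PySem.Int.band_nonneg_of_nonneg_left PySem.Int.band_comm PySem.Int.bor_comm PySem.Int.bxor_comm PySem.Int.band_zero
  PySem.Int.bor_zero PySem.Int.bxor_zero PySem.Int.bxor_self PySem.Int.band_self PySem.Int.band_neg_one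
  PySem.Int.band_one PySem.Int.ofStrBase?_ofList PySem.Int.toList_toStr PySem.Int.toList_toBin PySem.Int.toList_pyBin
  PySem.Int.ofStr?_ofList PySem.List.pyGet?_of_nonneg_of_lt PySem.List.pyGet?_neg PySem.List.pyGet?_eq_none_iff
  PySem.List.slice_none_none PySem.List.clampIdx_of_nonneg_of_le PySem.List.slice_of_nonneg
  PySem.List.clampIdx_of_nonneg PySem.List.slice_to PySem.List.slice_from PySem.List.length_pyRange_one
  PySem.List.insertBy_perm PySem.List.foldl_insertBy_perm PySem.List.sorted_perm PySem.List.sorted2_perm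
  PySem.List.length_sorted PySem.List.len_eq PySem.List.pyGet?_ofNat PySem.List.pyGet?_zero_cons
  PySem.List.pyGet?_neg_one PySem.List.pyRepeat_singleton PySem.List.pop?_zero_cons PySem.List.pop?_last
  PySem.List.length_slice_le PySem.List.mem_pyRange_one PySem.List.pyRange_one_eq_nil PySem.List.pyRange_one_cons
  PySem.List.pyRange_one_singleton PySem.List.pyRange_one_succ_right PySem.List.pyGetD_ofNat PySem.List.pyGetD_of_none
  PySem.List.index?_eq_none_iff PySem.List.index?_eq_idxOf? PySem.List.count_eq PySem.List.insertBy_mem_iff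
  PySem.List.mem_sorted PySem.List.min?_mem PySem.List.max?_mem PySem.List.min?_eq_none_iff
  PySem.List.max?_eq_none_iff PySem.List.remove?_eq_none_iff PySem.List.length_insert
  PySem.List.foldl_append_singleton_eq_map PySem.List.foldl_append_singleton_eq_self PySem.List.foldl_append_if
  PySem.List.foldl_append_ite PySem.List.foldl_append_if_eq_filter PySem.List.foldl_append_ite_eq_filter
  PySem.List.foldl_append_eq_flatMap PySem.List.foldl_append_eq_flatten PySem.List.foldl_if_eq_foldl_filter
  PySem.List.foldl_ite_eq_foldl_filter PySem.List.foldl_congr_mem PySem.List.foldl_congr_mem' PySem.List.foldl_add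
  PySem.List.foldl_add_nat PySem.List.foldl_if_add_one PySem.List.foldl_ite_add_one PySem.List.foldl_beq_add_one
  PySem.List.foldl_if_false_eq PySem.List.foldl_if_true_eq PySem.List.foldl_ite_false_eq PySem.List.foldl_ite_true_eq
  PySem.List.foldl_ignore PySem.List.pyGet?_natCast PySem.List.pyGet?_of_nonneg PySem.List.pyGetD_natCast
  PySem.List.pyGetD_eq_getElem PySem.List.pyGet?_cons_succ PySem.List.pyGet?_append_right
  PySem.List.pyGet?_append_length PySem.List.pyGet?_neg_natCast PySem.List.pyGetD_neg_natCast
  PySem.List.mem_of_pyGet?_eq_some PySem.List.pyGetD_mem PySem.List.pySet?_natCast PySem.List.pySet?_eq_none_iff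
  PySem.List.pySetD_natCast PySem.List.length_pySetD PySem.List.pyGetD_pySetD_natCast PySem.List.pop?_natCast
  PySem.List.length_of_pop?_eq_some PySem.List.remove?_cons_self PySem.List.remove?_cons_of_ne
  PySem.List.remove?_eq_some_erase PySem.List.index?_cons_self PySem.List.index?_cons_of_ne
  PySem.List.index?_append_singleton_self PySem.List.index?_isSome_iff PySem.List.mem_of_mem_slice
  PySem.List.clampIdx_le PySem.List.clampIdx_natCast PySem.List.slice_natCast PySem.List.slice_natCast_add
  PySem.List.slice_to_natCast PySem.List.slice_from_natCast PySem.List.slice_zero_start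
  PySem.List.slice_to_neg_natCast PySem.List.slice_from_neg_natCast PySem.List.length_slice
  PySem.List.pyRange_one_append PySem.List.getElem?_pyRange_one PySem.List.getElem_pyRange_one
  PySem.List.pairwise_lt_pyRange_one PySem.List.nodup_pyRange_one PySem.List.pyRange_neg_one
  PySem.List.pyRange_neg_one_eq_nil PySem.List.pyRange_neg_one_cons PySem.List.mem_pyRange_neg_one
  PySem.List.length_pyRange_neg_one PySem.List.pyRange_neg_one_eq_reverse PySem.List.map_pyGetD_pyRange
  PySem.List.map_pyGetD_pyRange_zero PySem.List.map_pyGetD_pyRange' PySem.List.map_pyGetD_pyRange_zero'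
  PySem.List.foldl_pyRange_pyGetD PySem.List.foldl_pyRange_zero_pyGetD PySem.List.foldl_pyRange_pyGetD'
  PySem.List.foldl_pyRange_zero_pyGetD' PySem.List.enumerate_nil PySem.List.enumerate_cons PySem.List.length_enumerate
  PySem.List.map_snd_enumerate PySem.List.map_fst_enumerate PySem.List.getElem?_enumerate PySem.List.getElem_enumerate
  PySem.List.mem_enumerate_iff PySem.List.pairwise_lt_enumerate PySem.List.enumerate_append
  PySem.List.enumerate_eq_map_pyRange PySem.List.mem_insertBy PySem.List.sorted_eq_nil_iff
  PySem.List.insertBy_of_forall_not_before PySem.List.pyGetD_neg_ofNat PySem.List.pyGet?_neg_ofNat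
  PySem.List.slice_to_neg_ofNat PySem.List.slice_from_neg_ofNat PySem.List.clampIdx_neg_natCast
  PySem.List.clampIdx_neg_ofNat PySem.List.clampIdx_neg_one PySem.List.pyGetD_neg_one
  PySem.List.pyGet?_neg_one_append_singleton PySem.List.pyGetD_neg_one_append_singleton PySem.List.pyGetD_zero_cons
  PySem.List.pyGet?_zero PySem.List.pyGetD_zero PySem.List.pyGet?_eq_some_getElem PySem.List.pyGetD_map_pyRange_one
  PySem.List.pyGetD_map_pyRange PySem.List.pyGetD_map_pyRange_of_nonneg PySem.List.getElem?_map_pyRange_zero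
  PySem.List.slice?_none_none_neg_one PySem.List.slice_to_neg_one PySem.List.slice_from_neg_one
  PySem.List.slice_from_one PySem.List.index?_eq_some_iff PySem.List.getElem_of_index?_eq_some
  PySem.List.index?_append_of_mem PySem.List.insert_natCast PySem.List.insert_ofNat
  PySem.List.length_take_append_cons_drop PySem.List.insert_zero PySem.List.insert_length PySem.List.insert_len
  PySem.List.foldl_prod_mk PySem.List.any_congr_mem PySem.List.le_foldl_max_nat PySem.List.le_foldl_max_int
  PySem.List.pySetD_of_nonneg PySem.List.slice_toNat PySem.List.combinations_zero PySem.List.combinations_nil_succ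
  PySem.List.combinations_cons_succ PySem.List.mem_combinations_iff PySem.List.combinations_eq_nil_of_length_lt
  PySem.List.combinations_one PySem.List.combinations_length_self PySem.List.length_of_mem_combinations
  PySem.List.sublist_of_mem_combinations PySem.List.combinations_map PySem.List.foldl_append_singleton
  PySem.List.foldl_count_if PySem.List.getD_map_range PySem.List.getD_map PySem.List.getD_map_of_lt
  PySem.List.pyGetD_map PySem.List.pyGetD_map_natCast PySem.List.pyGetD_ofNat' PySem.List.pyGet?_ofNat'
  PySem.List.map_pyRange_zero_pyGetD PySem.List.map_pyRange_zero_pyGetD' PySem.List.sum_map_ite_one_zero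
  PySem.List.sum_map_ite_one_zero' PySem.List.sum_map_ite_one_zero_nat PySem.List.sum_map_ite_one_zero_nat'
  PySem.List.sum_map_toNat PySem.List.sum_map_const_int PySem.List.sum_map_const_nat
  PySem.List.sum_append_singleton_int PySem.List.sum_map_add_int PySem.List.sum_map_const_mul_int
  PySem.List.mem_pyRange_of_pos PySem.List.mem_pyRange_of_neg PySem.List.mem_pyRange_iff_of_pos
  PySem.List.mem_pyRange_iff_of_neg PySem.List.maxD_nil PySem.List.minD_nil PySem.List.maxD_mem PySem.List.minD_mem
  PySem.List.permutations_zero PySem.List.permutations_nil_succ PySem.List.perm_cons_eraseIdx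
  PySem.List.exists_perm_of_mem_permutations PySem.List.length_of_mem_permutations PySem.List.perm_of_mem_permutations
  PySem.List.mem_of_mem_of_mem_permutations PySem.List.permutations_eq_nil_of_length_lt PySem.List.bisectLeft_nil
  PySem.List.bisectRight_nil PySem.List.bisectLeft_spec PySem.List.bisectRight_spec PySem.Set.empty_eq
  PySem.Set.len_eq PySem.Set.ofList_nil PySem.Set.update_nil PySem.Set.update_cons PySem.Set.update_append
  PySem.Set.ofList_append_singleton PySem.Set.ofList_append PySem.Set.contains_eq_listContains PySem.Set.contains_iff
  PySem.Set.contains_eq_decide PySem.Set.add_of_mem PySem.Set.add_of_not_mem PySem.Set.mem_add PySem.Set.nodup_add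
  PySem.Set.mem_update PySem.Set.nodup_update PySem.Set.mem_ofList PySem.Set.nodup_ofList PySem.Set.mem_union
  PySem.Set.nodup_union PySem.Set.mem_inter PySem.Set.mem_diff PySem.Set.mem_discard PySem.Set.nodup_inter
  PySem.Set.nodup_diff PySem.Set.nodup_discard PySem.Set.remove?_eq_none_iff PySem.Set.remove?_of_mem
  PySem.Set.issubset_iff PySem.Set.issuperset_iff PySem.Set.equal_iff PySem.Set.mem_symmDiff PySem.Set.nodup_symmDiff
  PySem.Set.isdisjoint_iff PySem.Set.update_eq_append_of_disjoint PySem.Set.ofList_cons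
  PySem.Set.ofList_eq_self_of_nodup PySem.Set.ofList_ofList PySem.Set.length_ofList_le PySem.Set.update_empty
  PySem.Set.update_nil_left PySem.Set.mem_foldl_add PySem.Set.update_map_eq_foldl_add PySem.List.dedup_eq_ofList
  PySem.List.mem_dedup PySem.List.nodup_dedup PySem.Dict.get?_empty PySem.Dict.getD_empty PySem.Dict.contains_empty
  PySem.Dict.size_empty PySem.Dict.keys_empty PySem.Dict.get?_insert_self PySem.Dict.get?_insert_of_ne
  PySem.Dict.getD_insert_self PySem.Dict.getD_insert_of_ne PySem.Dict.contains_insert_self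
  PySem.Dict.get?_eq_none_iff_contains PySem.Dict.getD_modify_self PySem.Dict.getD_modify_of_ne
  PySem.Dict.contains_iff_mem_keys PySem.Dict.contains_insert PySem.Dict.mem_keys_insert PySem.Dict.keys_modify
  PySem.Dict.contains_modify PySem.Dict.get?_of_mem_items PySem.Dict.size_insert
  PySem.Dict.keys_insert_of_not_contains PySem.Dict.keys_insert_of_contains PySem.Dict.nodup_keys_insert
  PySem.Dict.nodup_keys_update PySem.Dict.nodup_keys_ofList PySem.Dict.nodup_keys_empty
  PySem.Dict.getD_of_get?_eq_some PySem.Dict.getD_of_get?_eq_none PySem.Dict.items_insert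
  PySem.Dict.items_insert_of_not_contains PySem.Dict.items_insert_of_contains PySem.Dict.get?_mk_cons
  PySem.Dict.contains_mk PySem.Dict.keys_mk PySem.Dict.values_mk PySem.Dict.getD_of_not_contains
  PySem.Dict.get?_insert PySem.Dict.getD_insert PySem.Dict.getD_modify PySem.Dict.contains_eq_decide_mem_keys
  PySem.Dict.mem_items_insert PySem.Dict.mem_items_insert_self PySem.Dict.mem_values_insert
  PySem.Dict.mem_items_of_get?_eq_some PySem.Dict.get?_eq_some_iff_mem_items PySem.Dict.getD_of_mem_items
  PySem.Dict.mem_keys_of_mem_items PySem.Dict.get?_eq_none_iff_not_mem_keys PySem.Dict.keys_foldl_insert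
  PySem.Dict.keys_foldl_insert_key PySem.Dict.keys_foldl_modify_key PySem.Dict.keys_foldl_modify
  PySem.Dict.getD_foldl_modify_add_one PySem.Dict.getD_foldl_insert_add_one PySem.Dict.getD_foldl_modify_add_one_nat
  PySem.Dict.getD_foldl_modify_append PySem.Dict.counter_eq_foldl PySem.Dict.foldl_insert_getD_add_one_eq_counter
  PySem.Dict.counter_append_singleton PySem.Dict.getD_counter PySem.Dict.keys_counter PySem.Dict.contains_counter
  PySem.Dict.nodup_keys_counter PySem.Dict.items_counter PySem.Dict.setdefault_of_contains
  PySem.Dict.setdefault_of_not_contains PySem.Dict.insert_insert_self PySem.Dict.get?_insert_insert_comm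
  PySem.Dict.getD_insert_insert_comm PySem.Dict.contains_insert_insert_comm PySem.Dict.nodup_keys_foldl_insert_key
  PySem.Dict.nodup_keys_foldl_insert PySem.Dict.nodup_keys_foldl_modify_key PySem.Dict.items_eq_map_keys
  PySem.Dict.values_eq_map_keys PySem.Dict.items_foldl_insert_fresh PySem.Dict.get?_setdefault_self
  PySem.Dict.get?_setdefault_of_ne PySem.Dict.getD_setdefault_self PySem.Dict.contains_setdefault
  PySem.Dict.keys_setdefault PySem.Chars.join_nil PySem.Chars.join_singleton PySem.Chars.join_cons_cons
  PySem.Chars.join_nil_singletons PySem.Chars.pyGet?_eq_listPyGet? PySem.Chars.slice_eq_listSlice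
  PySem.Chars.slice?_eq_listSlice? PySem.Chars.len_eq PySem.Chars.startswith_iff PySem.Chars.endswith_iff
  PySem.Chars.length_zfill PySem.Chars.find_ne_neg_one_iff PySem.Chars.find_eq_neg_one_iff PySem.Chars.neg_one_le_find
  PySem.Chars.find_le_length PySem.Chars.find_nonneg_iff PySem.Chars.isIn_iff_infix PySem.Chars.isIn_eq_false_iff
  PySem.Chars.isIn_nil PySem.Chars.find_nil PySem.Chars.find_spec PySem.Chars.exists_prefix_drop_iff_isIn
  PySem.Chars.findFrom_natCast PySem.Chars.findFrom_zero PySem.Chars.findFrom_natCast_eq_neg_one_iff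
  PySem.Chars.findFrom_natCast_spec PySem.Chars.splitMax?_of_neg PySem.Chars.split₀Max_of_neg PySem.Str.len_eq
  PySem.Str.toList_lower PySem.Str.toList_zfill PySem.Str.toList_upper PySem.Str.toList_strip PySem.Str.toList_lstrip
  PySem.Str.toList_rstrip PySem.Str.toList_replace PySem.Str.toList_slice PySem.Str.toList_join
  PySem.Str.split₀_map_toList PySem.Str.splitlines_map_toList PySem.Str.strIsdigit_eq PySem.Str.strIsalpha_eq
  PySem.Str.strIsalnum_eq PySem.Str.strIsspace_eq PySem.Str.find_eq PySem.Str.isIn_eq PySem.Str.count_eq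
  PySem.Str.startswith_eq PySem.Str.endswith_eq PySem.Str.pyGet?_eq PySem.Str.toList_stripChars PySem.Str.split?_map
  PySem.Str.slice?_map PySem.Str.isIn_iff_infix PySem.Str.find_ne_neg_one_iff PySem.Str.find_eq_neg_one_iff
  PySem.Str.find_nonneg_iff PySem.Str.slice?_none_none_neg_one PySem.Str.slice_to_neg_one PySem.Str.pyGet?_natCast
  PySem.Str.findFrom_eq PySem.Str.splitMax?_map PySem.Str.split₀Max_map_toList PySem.Str.rfind_eq
  PySem.Str.rfindFrom_eq PySem.Str.len_append PySem.List.insertBy_pairwise_le PySem.List.insertBy_pairwise_ge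
  PySem.List.sorted_pairwise PySem.List.sorted_pairwise_rev PySem.List.sorted_map_key_pairwise PySem.List.max?_isMax
  PySem.List.min?_isMin PySem.List.max?_id_le PySem.List.min?_id_le PySem.List.sorted_eq_self_of_pairwise
  PySem.List.sorted_rev_eq_self_of_pairwise PySem.List.sorted_sorted PySem.List.sorted_rev_sorted_rev
  PySem.List.eq_of_perm_of_pairwise_le_of_pairwise_lt PySem.List.sorted_eq_of_perm_of_pairwise_lt
  PySem.List.eq_of_perm_of_pairwise_ge_of_pairwise_gt PySem.List.sorted_rev_eq_of_perm_of_pairwise_gt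
  PySem.List.eq_of_perm_of_pairwise_le PySem.List.sorted_id_eq_of_perm_of_pairwise PySem.List.key_head_sorted_le
  PySem.List.key_head_sorted_rev_ge PySem.List.sorted_ofList_pairwise_lt PySem.List.max?_id_cons
  PySem.List.min?_id_cons PySem.List.le_foldl_max PySem.List.foldl_min_le PySem.List.foldl_max_mem
  PySem.List.foldl_min_mem PySem.List.eq_of_perm_of_pairwise_le_of_injective PySem.List.sorted_eq_sorted_of_perm
  PySem.List.sorted_id_eq_sorted_id_iff_perm PySem.List.key_sorted_getElem_mono PySem.List.sorted_id_getElem_mono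
  PySem.List.le_key_maxD PySem.List.key_minD_le PySem.List.le_maxD_id PySem.List.minD_id_le PySem.List.maxD_id_cons
  PySem.List.minD_id_cons
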